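-- pv_equiv track=rewrite | github.com/Daniel-Sottovia/INE5603 | Exercícios/lista11.py | coluna_neg
-- ===== SOURCE A (Python) =====
-- def coluna_neg(matriz):
--     coluna = len(matriz[0])
--     cc = 0
--     linha = len(matriz)
--     final = []
--     while cc < coluna:
--         cl = 0
--         neg_lin = 0
--         while cl < linha:
--             if matriz[cl][cc] < 0:
--                 neg_lin += 1
--             cl += 1
--
--         if neg_lin == cl:
--             final.append(cc)
--
--         cc += 1
--     return final
-- ===== SOURCE B (Python) =====
-- def coluna_neg(matriz):
--     # Row-major single pass with a shrinking candidate set: start with all column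
--     # indices, and each row eliminates the candidates where it is non-negative.
--     candidates = list(range(len(matriz[0])))
--     for row in matriz:
--         candidates = [c for c in candidates if row[c] < 0]
--     return candidates
-- ===== Notes on version B (the rewrite author's own statement) =====
-- stated objective: faster
-- what changed: Replaces A's column-major nested loops (counting negatives per column) by a single row-major pass that maintains a shrinking list of candidate columns, filtering out a candidate as soon as a row is non-negative there.
import Mathlib
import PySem

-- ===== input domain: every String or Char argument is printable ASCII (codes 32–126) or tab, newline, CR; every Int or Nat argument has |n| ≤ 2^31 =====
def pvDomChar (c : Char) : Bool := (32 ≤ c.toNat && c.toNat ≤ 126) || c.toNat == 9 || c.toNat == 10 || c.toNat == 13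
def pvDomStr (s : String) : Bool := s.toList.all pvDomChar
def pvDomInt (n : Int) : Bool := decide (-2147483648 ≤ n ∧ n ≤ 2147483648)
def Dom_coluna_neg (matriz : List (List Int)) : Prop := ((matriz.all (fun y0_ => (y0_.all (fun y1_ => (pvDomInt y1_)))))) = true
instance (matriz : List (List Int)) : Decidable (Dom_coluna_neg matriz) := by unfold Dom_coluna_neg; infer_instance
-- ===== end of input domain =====

-- B replaces A's column-major nested counting loops by one row-major pass that keeps a
-- shrinking list of candidate columns, each row filtering out the non-negative ones
-- (alternative decomposition; same asymptotic cost).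

-- ===== PORT A =====
def coluna_neg (matriz : List (List Int)) : List Int :=
  let coluna : Int := ((PySem.List.pyGet? matriz 0).getD []).length
  let linha : Int := matriz.length
  (PySem.List.pyRange 0 coluna 1).foldl (fun final cc =>
    let neg_lin : Int := (PySem.List.pyRange 0 linha 1).foldl (fun n cl =>
      if PySem.List.pyGetD (PySem.List.pyGetD matriz cl []) cc 0 < 0 then n + 1 else n) 0
    if neg_lin = linha then final ++ [cc] else final) []

-- ===== PORT B =====
def coluna_neg_alt (matriz : List (List Int)) : List Int :=
  let candidates : List Int :=
    PySem.List.pyRange 0 (((PySem.List.pyGet? matriz 0).getD []).length : Int) 1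
  matriz.foldl (fun cands row =>
    cands.filter (fun c => decide (PySem.List.pyGetD row c 0 < 0))) candidates

-- ===== PRECONDITION & SPEC =====
-- Pre_ excludes exactly the inputs on which A raises IndexError: the empty matrix
-- (matriz[0]) and matrices with a row shorter than the first row (matriz[cl][cc]).
def Pre_coluna_neg (matriz : List (List Int)) : Prop :=
  matriz ≠ [] ∧ ∀ r ∈ matriz, (matriz.headD []).length ≤ r.length
instance (matriz : List (List Int)) : Decidable (Pre_coluna_neg matriz) := by
  unfold Pre_coluna_neg; infer_instance
def pvWitness_coluna_neg : List (List Int) := [[-1, 2], [-3, -4]]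

def Spec_coluna_neg (matriz : List (List Int)) (out : List Int) : Prop := out = coluna_neg_alt matriz
instance (matriz : List (List Int)) (out : List Int) : Decidable (Spec_coluna_neg matriz out) := by unfold Spec_coluna_neg; infer_instance

-- ===== CLAIM (what is proved, stated in full; the proofs are below) =====
def Claim_equal_coluna_neg : Prop := ∀ (matriz : List (List Int)), Dom_coluna_neg matriz → Pre_coluna_neg matriz → Spec_coluna_neg matriz (coluna_neg matriz)

-- ===== LEMMAS AND PROOFS =====

theorem pyGetD_nonneg_getD {α : Type} (xs : List α) (i : Int) (d : α) (h0 : 0 ≤ i) :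
    PySem.List.pyGetD xs i d = xs.getD i.toNat d := by
  rw [show i = ((i.toNat : Nat) : Int) from by omega, PySem.List.pyGetD_natCast,
      show (((i.toNat : Nat) : Int)).toNat = i.toNat from by omega]

-- B's row-by-row pruning fold equals one filter by "all rows negative here"
theorem foldl_filter_all (rows : List (List Int)) (init : List Int) :
    rows.foldl (fun cands row =>
        cands.filter (fun c => decide (PySem.List.pyGetD row c 0 < 0))) init
    = init.filter (fun c => rows.all (fun r => decide (PySem.List.pyGetD r c 0 < 0))) := by
  induction rows generalizing init with
  | nil => simp
  | cons r rs ih =>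
    simp only [List.foldl_cons, ih, List.filter_filter, List.all_cons]
    refine List.filter_congr (fun c _ => ?_)
    rw [Bool.and_comm]

theorem coluna_neg_spec_aux (m : List (List Int)) (hp : Pre_coluna_neg m) :
    coluna_neg m = coluna_neg_alt m := by
  obtain ⟨hm, hlen⟩ := hp
  obtain ⟨r0, rest, rfl⟩ : ∃ r0 rest, m = r0 :: rest := by
    cases m with
    | nil => exact absurd rfl hm
    | cons a t => exact ⟨a, t, rfl⟩
  set m := r0 :: rest with hmdef
  have hhead : m.headD [] = r0 := rfl
  have hget : PySem.List.pyGet? m 0 = some r0 := by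
    rw [hmdef]; exact PySem.List.pyGet?_zero_cons _ _
  set w : Nat := r0.length with hw
  have hlenw : ∀ r ∈ m, w ≤ r.length := by
    intro r hr; have := hlen r hr; rw [hhead] at this; exact this
  -- ---- A side: filter by "count of negative rows = number of rows" ----
  have hA : coluna_neg m =
      (PySem.List.pyRange 0 (w : Int) 1).filter
        (fun cc => decide ((PySem.List.pyRange 0 (m.length : Int) 1).foldl (fun n cl =>
          if PySem.List.pyGetD (PySem.List.pyGetD m cl []) cc 0 < 0 then n + 1 else n) 0
          = (m.length : Int))) := by
    rw [coluna_neg]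
    simp only [hget, Option.getD_some, ← hw]
    rw [PySem.List.foldl_append_ite_eq_filter]
    rw [List.nil_append]
  -- the inner count equals m.length iff every row is negative at cc
  have hinner : ∀ cc ∈ PySem.List.pyRange 0 (w : Int) 1,
      (decide ((PySem.List.pyRange 0 (m.length : Int) 1).foldl (fun n cl =>
          if PySem.List.pyGetD (PySem.List.pyGetD m cl []) cc 0 < 0 then n + 1 else n) 0
          = (m.length : Int)))
      = m.all (fun r => decide (PySem.List.pyGetD r cc 0 < 0)) := by
    intro cc hcc
    have hccr := PySem.List.mem_pyRange_one.mp hcc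
    have hlen_range : (PySem.List.pyRange 0 (m.length : Int) 1).length = m.length := by
      rw [PySem.List.length_pyRange_one]; simp
    rw [PySem.List.foldl_ite_add_one, Bool.eq_iff_iff, decide_eq_true_iff, List.all_eq_true]
    rw [show ((0 : Int) + ((PySem.List.pyRange 0 (m.length : Int) 1).countP
          (fun cl => decide (PySem.List.pyGetD (PySem.List.pyGetD m cl []) cc 0 < 0)) : Int)
          = (m.length : Int))
        ↔ (((PySem.List.pyRange 0 (m.length : Int) 1).countP
          (fun cl => decide (PySem.List.pyGetD (PySem.List.pyGetD m cl []) cc 0 < 0)))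
          = (PySem.List.pyRange 0 (m.length : Int) 1).length) from by
      rw [hlen_range]; omega]
    rw [List.countP_eq_length]
    constructor
    · intro hall r hr
      obtain ⟨k, hkl, hrk⟩ := List.mem_iff_getElem.mp hr
      have hrk' : m.getD k [] = r := by rw [List.getD_eq_getElem _ _ hkl]; exact hrk
      have hcl : (k : Int) ∈ PySem.List.pyRange 0 (m.length : Int) 1 := by
        rw [PySem.List.mem_pyRange_one]; omega
      have := hall _ hcl
      rw [PySem.List.pyGetD_natCast, hrk'] at this
      exact this
    · intro hall cl hcl
      have hclr := PySem.List.mem_pyRange_one.mp hcl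
      have hcll : cl.toNat < m.length := by omega
      have hrm : m.getD cl.toNat [] ∈ m := by
        rw [List.getD_eq_getElem _ _ hcll]; exact List.getElem_mem _
      rw [pyGetD_nonneg_getD m cl [] (by omega)]
      exact hall _ hrm
  -- ---- B side ----
  have hB : coluna_neg_alt m =
      (PySem.List.pyRange 0 (w : Int) 1).filter
        (fun c => m.all (fun r => decide (PySem.List.pyGetD r c 0 < 0))) := by
    rw [coluna_neg_alt]
    simp only [hget, Option.getD_some, ← hw]
    exact foldl_filter_all m _
  rw [hA, hB]
  exact List.filter_congr hinner

-- ===== VERDICT (by name: the statement is the Claim_ definition above) =====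
theorem coluna_neg_spec : Claim_equal_coluna_neg := by
  intro m _ hp
  unfold Spec_coluna_neg
  exact coluna_neg_spec_aux m hp
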